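-- pv_equiv track=rewrite | github.com/Knowledge-Base-9921/Codility | Lesson19-Data Structures/countries_count.py | solution
-- ===== SOURCE A (Python) =====
-- from collections import deque
--
-- def solution(K, A):
--     """
--     Calculates the number of bounded slices in an array A.
--
--     A slice (P, Q) is bounded if max(A[P...Q]) - min(A[P...Q]) <= K.
--
--     Args:
--         K: An integer, the maximum allowed difference between max and min in a slice.
--         A: A non-empty array of N integers.
--
--     Returns:
--         The number of bounded slices. If the count exceeds 1,000,000,000,
--         it returns 1,000,000,000.
--     """
--     N = len(A)
--     count = 0
--     left = 0  # Left pointer of the sliding window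
--
--     # Deques to efficiently maintain the minimum and maximum elements in the current window
--     # min_deque stores indices of elements in increasing order of their values.
--     # max_deque stores indices of elements in decreasing order of their values.
--     min_deque = deque()
--     max_deque = deque()
--
--     # Iterate with the right pointer to expand the window
--     for right in range(N):
--         # Maintain min_deque: Remove elements from the right end that are greater than A[right]
--         while min_deque and A[min_deque[-1]] >= A[right]:
--             min_deque.pop()
--         min_deque.append(right) # Add current index to min_deque
--
--         # Maintain max_deque: Remove elements from the right end that are smaller than A[right]
--         while max_deque and A[max_deque[-1]] <= A[right]:
--             max_deque.pop()
--         max_deque.append(right) # Add current index to max_deque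
--
--         # Shrink the window from the left if the current slice (A[left...right]) is not bounded
--         # This loop ensures that A[max_deque[0]] - A[min_deque[0]] <= K always holds
--         # for the current (left, right) window after the loop.
--         while A[max_deque[0]] - A[min_deque[0]] > K:
--             # If the element at the 'left' pointer is the current minimum in the window,
--             # remove its index from the min_deque.
--             if min_deque[0] == left:
--                 min_deque.popleft()
--             # If the element at the 'left' pointer is the current maximum in the window,
--             # remove its index from the max_deque.
--             if max_deque[0] == left:
--                 max_deque.popleft()
--             left += 1 # Shrink the window by moving the left pointer to the right
--
--         # At this point, the slice A[left...right] is bounded.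
--         # All slices (P, right) where left <= P <= right are also bounded.
--         # The number of such slices is (right - left + 1).
--         count += (right - left + 1)
--
--         # Check if the total count exceeds the maximum allowed value
--         if count > 1_000_000_000:
--             return 1_000_000_000
--
--     return count
-- ===== SOURCE B (Python) =====
-- def solution(K, A):
--     N = len(A)
--     count = 0
--     for p in range(N):
--         cur_max = A[p]
--         cur_min = A[p]
--         for q in range(p, N):
--             if A[q] > cur_max:
--                 cur_max = A[q]
--             if A[q] < cur_min:
--                 cur_min = A[q]
--             if cur_max - cur_min > K:
--                 break
--             count += 1
--     return min(count, 1_000_000_000)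
-- ===== Notes on version B (the rewrite author's own statement) =====
-- stated objective: simpler
-- what changed: Replaced the monotonic-deque sliding window (two deques, a moving left pointer, incremental early-return cap) with a plain per-start rescan that extends each slice until max-min first exceeds K, capping the total once at the end with min(count, 1e9).
import Mathlib
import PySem

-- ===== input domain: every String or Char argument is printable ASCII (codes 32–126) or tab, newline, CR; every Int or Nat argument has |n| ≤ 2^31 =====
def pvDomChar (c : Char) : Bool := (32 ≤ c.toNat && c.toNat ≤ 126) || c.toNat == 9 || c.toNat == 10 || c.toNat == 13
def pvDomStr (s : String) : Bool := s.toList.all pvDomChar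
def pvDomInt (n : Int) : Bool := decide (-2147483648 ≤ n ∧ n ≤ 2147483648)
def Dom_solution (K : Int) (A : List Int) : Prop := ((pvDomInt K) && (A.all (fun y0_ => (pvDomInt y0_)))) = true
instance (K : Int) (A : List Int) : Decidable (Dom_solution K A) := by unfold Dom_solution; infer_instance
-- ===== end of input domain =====

-- B replaces A's monotonic-deque sliding window by a per-start rescan that breaks at the
-- first unbounded extension (objective: simpler; not faster).

-- ===== PORT A =====
-- Deques are stored back-to-front (head = Python's right end), so Python's pop()/append()
-- are head operations, deque[0] is getLast?, and popleft() is dropLast.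

-- 'while min_deque and A[min_deque[-1]] >= A[right]: min_deque.pop()'
def pvPopGE (A : List Int) (x : Int) : List Nat → List Nat
  | [] => []
  | i :: rest => if A.getD i 0 ≥ x then pvPopGE A x rest else i :: rest

-- 'while max_deque and A[max_deque[-1]] <= A[right]: max_deque.pop()'
def pvPopLE (A : List Int) (x : Int) : List Nat → List Nat
  | [] => []
  | i :: rest => if A.getD i 0 ≤ x then pvPopLE A x rest else i :: rest

-- A[d[0]]; inside Pre_ the deque is never empty when Python reads d[0] (default 0 unreachable there)
def pvFront (A : List Int) (d : List Nat) : Int :=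
  match d.getLast? with
  | some i => A.getD i 0
  | none => 0

-- the inner 'while A[max_deque[0]] - A[min_deque[0]] > K' loop; fuel = len(A) bounds its iterations inside Pre_
def pvShrink (A : List Int) (K : Int) : Nat → Nat → List Nat → List Nat → Nat × List Nat × List Nat
  | 0, left, mn, mx => (left, mn, mx)
  | fuel + 1, left, mn, mx =>
    if pvFront A mx - pvFront A mn > K then
      pvShrink A K fuel (left + 1)
        (if mn.getLast? = some left then mn.dropLast else mn)
        (if mx.getLast? = some left then mx.dropLast else mx)
    else (left, mn, mx)

-- 'for right in range(N): …' with the early 'return 1_000_000_000'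
def pvALoop (A : List Int) (K : Int) : List Nat → Int → Nat → List Nat → List Nat → Int
  | [], count, _, _, _ => count
  | r :: rest, count, left, mn, mx =>
    let mn1 := r :: pvPopGE A (A.getD r 0) mn
    let mx1 := r :: pvPopLE A (A.getD r 0) mx
    let s := pvShrink A K A.length left mn1 mx1
    let c2 := count + ((r : Int) - (s.1 : Int) + 1)
    if c2 > 1000000000 then 1000000000
    else pvALoop A K rest c2 s.1 s.2.1 s.2.2

def solution (K : Int) (A : List Int) : Int :=
  pvALoop A K (List.range A.length) 0 0 [] []

-- ===== PORT B =====
-- 'for q in range(p, N): … break' maintaining cur_max, cur_min, count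
def pvBInner (A : List Int) (K : Int) : List Nat → Int → Int → Int → Int
  | [], _, _, cnt => cnt
  | q :: rest, mx, mn, cnt =>
    let mx' := if A.getD q 0 > mx then A.getD q 0 else mx
    let mn' := if A.getD q 0 < mn then A.getD q 0 else mn
    if mx' - mn' > K then cnt else pvBInner A K rest mx' mn' (cnt + 1)

-- 'for p in range(N): …'
def pvBOuter (A : List Int) (K : Int) : List Nat → Int → Int
  | [], cnt => cnt
  | p :: rest, cnt =>
    pvBOuter A K rest (pvBInner A K (List.range' p (A.length - p)) (A.getD p 0) (A.getD p 0) cnt)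

def solution_alt (K : Int) (A : List Int) : Int :=
  min (pvBOuter A K (List.range A.length) 0) 1000000000

-- ===== PRECONDITION & SPEC =====
-- Pre_ excludes exactly the inputs where A raises: for K < 0 and nonempty A the inner while
-- loop empties both deques and A[min_deque[0]] raises IndexError.
def Pre_solution (K : Int) (A : List Int) : Prop := 0 ≤ K ∨ A = []
instance (K : Int) (A : List Int) : Decidable (Pre_solution K A) := by unfold Pre_solution; infer_instance
def pvWitness_solution : Int × List Int := (2, [3, 5, 7, 6, 3])

def Spec_solution (K : Int) (A : List Int) (out : Int) : Prop := out = solution_alt K A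
instance (K : Int) (A : List Int) (out : Int) : Decidable (Spec_solution K A out) := by unfold Spec_solution; infer_instance

-- ===== CLAIM (what is proved, stated in full; the proofs are below) =====
def Claim_equal_solution : Prop := ∀ (K : Int) (A : List Int), Dom_solution K A → Pre_solution K A → Spec_solution K A (solution K A)

-- ===== LEMMAS AND PROOFS =====

-- 'the slice [p..q] is bounded': every pairwise difference inside it is ≤ K
def bddP (K : Int) (A : List Int) (p q : Nat) : Prop :=
  ∀ i ∈ Finset.Icc p q, ∀ j ∈ Finset.Icc p q, A.getD i 0 - A.getD j 0 ≤ K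

def bddB (K : Int) (A : List Int) (p q : Nat) : Bool :=
  decide (∀ i ∈ Finset.Icc p q, ∀ j ∈ Finset.Icc p q, A.getD i 0 - A.getD j 0 ≤ K)

theorem bddB_iff (K : Int) (A : List Int) (p q : Nat) : bddB K A p q = true ↔ bddP K A p q := by
  simp [bddB, bddP]

-- least left end of a bounded slice ending at r
def Wl (K : Int) (A : List Int) (r : Nat) : Nat :=
  (((List.range (r + 1)).filter (fun p => bddB K A p r)).headD (r + 1))


-- increasing-index list of candidate indices kept by a monotonic deque over the window [l..r]:
-- i is kept iff every later j in the window beats it under c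
def candL (A : List Int) (c : Int → Int → Bool) (l r : Nat) : List Nat :=
  (List.range (r + 1)).filter
    (fun i => decide (l ≤ i) && ((List.range' (i + 1) (r - i)).all (fun j => c (A.getD i 0) (A.getD j 0))))

def cLT : Int → Int → Bool := fun a b => decide (a < b)
def cGT : Int → Int → Bool := fun a b => decide (b < a)

-- number of q with [p..q] bounded (what B's inner loop counts)
def cntB (K : Int) (A : List Int) (p : Nat) : Nat :=
  ((Finset.Ico p A.length).filter (fun q => bddB K A p q = true)).card

theorem bdd_mono (K : Int) (A : List Int) {p q p' q' : Nat} (h : bddP K A p q)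
    (hp : p ≤ p') (hq : q' ≤ q) : bddP K A p' q' := by
  intro i hi j hj
  exact h i (Finset.Icc_subset_Icc hp hq hi) j (Finset.Icc_subset_Icc hp hq hj)

theorem bdd_self (K : Int) (A : List Int) (hK : 0 ≤ K) (r : Nat) : bddP K A r r := by
  intro i hi j hj
  simp only [Finset.mem_Icc] at hi hj
  have hi' : i = r := le_antisymm hi.2 hi.1
  have hj' : j = r := le_antisymm hj.2 hj.1
  rw [hi', hj']
  simpa using hK

theorem bdd_of_gt (K : Int) (A : List Int) {p q : Nat} (h : q < p) : bddP K A p q := by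
  intro i hi
  rw [Finset.Icc_eq_empty (by omega)] at hi
  simp at hi

theorem headD_le_of_sorted {l : List Nat} (h : l.Pairwise (· < ·)) {x : Nat} (hx : x ∈ l)
    (d : Nat) : l.headD d ≤ x := by
  cases l with
  | nil => simp at hx
  | cons a t =>
    rcases List.mem_cons.mp hx with rfl | hxt
    · simp
    · exact le_of_lt ((List.pairwise_cons.mp h).1 x hxt)

theorem headD_mem {l : List Nat} (h : l ≠ []) (d : Nat) : l.headD d ∈ l := by
  cases l with
  | nil => exact absurd rfl h
  | cons a t => simp

theorem mem_candL (A : List Int) (c : Int → Int → Bool) (l r i : Nat) :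
    i ∈ candL A c l r ↔
      i ≤ r ∧ l ≤ i ∧ ∀ j, i < j → j ≤ r → c (A.getD i 0) (A.getD j 0) = true := by
  simp only [candL, List.mem_filter, List.mem_range, Bool.and_eq_true, decide_eq_true_eq,
    List.all_eq_true, List.mem_range'_1]
  constructor
  · rintro ⟨hir, hli, hall⟩
    exact ⟨by omega, hli, fun j hij hjr => hall j ⟨by omega, by omega⟩⟩
  · rintro ⟨hir, hli, hall⟩
    exact ⟨by omega, hli, fun j hj => hall j (by omega) (by omega)⟩

theorem sorted_candL (A : List Int) (c : Int → Int → Bool) (l r : Nat) :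
    (candL A c l r).Pairwise (· < ·) :=
  List.Pairwise.sublist (List.filter_sublist) List.pairwise_lt_range

theorem pairwise_val_candL (A : List Int) (c : Int → Int → Bool) (l r : Nat) :
    (candL A c l r).Pairwise (fun a b => c (A.getD a 0) (A.getD b 0) = true) := by
  refine List.Pairwise.imp_of_mem ?_ (sorted_candL A c l r)
  intro a b ha hb hab
  rcases (mem_candL A c l r a).mp ha with ⟨_, _, hall⟩
  rcases (mem_candL A c l r b).mp hb with ⟨hbr, _, _⟩
  exact hall b hab hbr

theorem self_mem_candL (A : List Int) (c : Int → Int → Bool) {l r : Nat} (hl : l ≤ r) :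
    r ∈ candL A c l r := by
  rw [mem_candL]
  exact ⟨le_refl r, hl, fun j hj hjr => by omega⟩

theorem candL_ne_nil (A : List Int) (c : Int → Int → Bool) {l r : Nat} (hl : l ≤ r) :
    candL A c l r ≠ [] :=
  List.ne_nil_of_mem (self_mem_candL A c hl)

theorem popGE_eq (A : List Int) (x : Int) :
    ∀ {m : List Nat}, m.Pairwise (fun a b => A.getD b 0 < A.getD a 0) →
      pvPopGE A x m = m.filter (fun i => decide (A.getD i 0 < x)) := by
  intro m
  induction m with
  | nil => intro _; rfl
  | cons i t ih =>
    intro h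
    rcases List.pairwise_cons.mp h with ⟨h1, h2⟩
    by_cases hx : A.getD i 0 ≥ x
    · rw [pvPopGE, if_pos hx, ih h2, List.filter_cons_of_neg
        (by rw [decide_eq_true_eq]; omega)]
    · rw [pvPopGE, if_neg hx, List.filter_cons_of_pos (by rw [decide_eq_true_eq]; omega),
        List.filter_eq_self.mpr]
      intro b hb
      have := h1 b hb
      rw [decide_eq_true_eq]
      omega

theorem popLE_eq (A : List Int) (x : Int) :
    ∀ {m : List Nat}, m.Pairwise (fun a b => A.getD a 0 < A.getD b 0) →
      pvPopLE A x m = m.filter (fun i => decide (x < A.getD i 0)) := by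
  intro m
  induction m with
  | nil => intro _; rfl
  | cons i t ih =>
    intro h
    rcases List.pairwise_cons.mp h with ⟨h1, h2⟩
    by_cases hx : A.getD i 0 ≤ x
    · rw [pvPopLE, if_pos hx, ih h2, List.filter_cons_of_neg
        (by rw [decide_eq_true_eq]; omega)]
    · rw [pvPopLE, if_neg hx, List.filter_cons_of_pos (by rw [decide_eq_true_eq]; omega),
        List.filter_eq_self.mpr]
      intro b hb
      have := h1 b hb
      rw [decide_eq_true_eq]
      omega

theorem candL_succ (A : List Int) (c : Int → Int → Bool) {l e : Nat} (hl : l ≤ e + 1) :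
    candL A c l (e + 1)
      = (candL A c l e).filter (fun i => c (A.getD i 0) (A.getD (e + 1) 0)) ++ [e + 1] := by
  unfold candL
  rw [List.filter_filter, List.range_succ, List.filter_append]
  congr 1
  · refine List.filter_congr ?_
    intro i hi
    have hie : i ≤ e := by simpa using List.mem_range.mp hi
    have h1 : e + 1 - i = (e - i) + 1 := by omega
    rw [h1, List.range'_1_concat, List.all_append]
    have h2 : i + 1 + (e - i) = e + 1 := by rw [Nat.add_comm (i+1), ← Nat.add_assoc]; omega
    rw [h2]
    simp only [List.all_cons, List.all_nil, Bool.and_true]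
    cases hd : decide (l ≤ i) <;>
      cases ha : (List.range' (i + 1) (e - i)).all (fun j => c (A.getD i 0) (A.getD j 0)) <;>
      cases hc : c (A.getD i 0) (A.getD (e + 1) 0) <;> simp
  · simp [hl]

theorem candL_succ_left (A : List Int) (c : Int → Int → Bool) (l r : Nat) :
    candL A c (l + 1) r
      = if (candL A c l r).head? = some l then (candL A c l r).tail else candL A c l r := by
  have key : candL A c (l + 1) r = (candL A c l r).filter (fun i => decide (l + 1 ≤ i)) := by
    unfold candL
    rw [List.filter_filter]
    refine List.filter_congr ?_
    intro i _
    by_cases h : l + 1 ≤ i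
    · have h' : l ≤ i := by omega
      simp [h, h']
    · simp [h]
  have hsort := sorted_candL A c l r
  rcases hm : candL A c l r with _ | ⟨a, t⟩
  · rw [key, hm]
    simp
  · rw [hm] at hsort
    have hts : ∀ b ∈ t, a < b := (List.pairwise_cons.mp hsort).1
    have ha : l ≤ a := ((mem_candL A c l r a).mp (hm ▸ List.mem_cons_self)).2.1
    by_cases hal : a = l
    · subst hal
      rw [key, hm, if_pos (show (a :: t).head? = some a from rfl), List.tail_cons, List.filter_cons_of_neg (by simp),
        List.filter_eq_self.mpr]
      intro b hb
      have := hts b hb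
      simp only [decide_eq_true_eq]
      omega
    · rw [key, hm]
      have : ¬ ((a :: t).head? = some l) := by simp [hal]
      rw [if_neg this, List.filter_cons_of_pos (by simp only [decide_eq_true_eq]; omega),
        List.filter_eq_self.mpr]
      intro b hb
      have := hts b hb
      simp only [decide_eq_true_eq]
      omega

theorem push_min (A : List Int) {l e : Nat} (hl : l ≤ e + 1) :
    (e + 1) :: pvPopGE A (A.getD (e + 1) 0) ((candL A cLT l e).reverse)
      = (candL A cLT l (e + 1)).reverse := by
  rw [candL_succ A cLT hl, List.reverse_append]
  simp only [List.reverse_cons, List.reverse_nil, List.nil_append, List.singleton_append]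
  congr 1
  rw [popGE_eq A _ ?pw, ← List.filter_reverse]
  case pw =>
    rw [List.pairwise_reverse]
    refine (pairwise_val_candL A cLT l e).imp ?_
    intro a b h
    simpa [cLT] using h
  rfl

theorem push_max (A : List Int) {l e : Nat} (hl : l ≤ e + 1) :
    (e + 1) :: pvPopLE A (A.getD (e + 1) 0) ((candL A cGT l e).reverse)
      = (candL A cGT l (e + 1)).reverse := by
  rw [candL_succ A cGT hl, List.reverse_append]
  simp only [List.reverse_cons, List.reverse_nil, List.nil_append, List.singleton_append]
  congr 1
  rw [popLE_eq A _ ?pw, ← List.filter_reverse]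
  case pw =>
    rw [List.pairwise_reverse]
    refine (pairwise_val_candL A cGT l e).imp ?_
    intro a b h
    simpa [cGT] using h
  rfl

theorem minCand_exists (A : List Int) {l r : Nat} :
    ∀ n i, r - i ≤ n → l ≤ i → i ≤ r →
      ∃ cI ∈ candL A cLT l r, A.getD cI 0 ≤ A.getD i 0 := by
  intro n
  induction n with
  | zero =>
    intro i hn hl hr
    have hir : i = r := by omega
    subst hir
    exact ⟨i, self_mem_candL A cLT hl, le_refl _⟩
  | succ n ih =>
    intro i hn hl hr
    by_cases hm : i ∈ candL A cLT l r
    · exact ⟨i, hm, le_refl _⟩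
    · rw [mem_candL] at hm
      push_neg at hm
      obtain ⟨j, hij, hjr, hcj⟩ := hm hr hl
      have hji : A.getD j 0 ≤ A.getD i 0 := by
        simp only [cLT, ne_eq, decide_eq_true_eq] at hcj
        omega
      obtain ⟨cI, hcI, hc⟩ := ih j (by omega) (by omega) hjr
      exact ⟨cI, hcI, le_trans hc hji⟩

theorem maxCand_exists (A : List Int) {l r : Nat} :
    ∀ n i, r - i ≤ n → l ≤ i → i ≤ r →
      ∃ cI ∈ candL A cGT l r, A.getD i 0 ≤ A.getD cI 0 := by
  intro n
  induction n with
  | zero =>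
    intro i hn hl hr
    have hir : i = r := by omega
    subst hir
    exact ⟨i, self_mem_candL A cGT hl, le_refl _⟩
  | succ n ih =>
    intro i hn hl hr
    by_cases hm : i ∈ candL A cGT l r
    · exact ⟨i, hm, le_refl _⟩
    · rw [mem_candL] at hm
      push_neg at hm
      obtain ⟨j, hij, hjr, hcj⟩ := hm hr hl
      have hji : A.getD i 0 ≤ A.getD j 0 := by
        simp only [cGT, ne_eq, decide_eq_true_eq] at hcj
        omega
      obtain ⟨cI, hcI, hc⟩ := ih j (by omega) (by omega) hjr
      exact ⟨cI, hcI, le_trans hji hc⟩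

theorem head_le_of_mem_minCand (A : List Int) {l r h0 cI : Nat}
    (h : (candL A cLT l r).head? = some h0) (hcI : cI ∈ candL A cLT l r) :
    A.getD h0 0 ≤ A.getD cI 0 := by
  have hpw := pairwise_val_candL A cLT l r
  cases hcand : candL A cLT l r with
  | nil => rw [hcand] at hcI; simp at hcI
  | cons a t =>
    rw [hcand] at h hcI hpw
    simp only [List.head?_cons, Option.some.injEq] at h
    subst h
    rcases List.mem_cons.mp hcI with rfl | hmem
    · exact le_refl _
    · have := (List.pairwise_cons.mp hpw).1 cI hmem
      rw [cLT, decide_eq_true_eq] at this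
      omega

theorem head_ge_of_mem_maxCand (A : List Int) {l r h0 cI : Nat}
    (h : (candL A cGT l r).head? = some h0) (hcI : cI ∈ candL A cGT l r) :
    A.getD cI 0 ≤ A.getD h0 0 := by
  have hpw := pairwise_val_candL A cGT l r
  cases hcand : candL A cGT l r with
  | nil => rw [hcand] at hcI; simp at hcI
  | cons a t =>
    rw [hcand] at h hcI hpw
    simp only [List.head?_cons, Option.some.injEq] at h
    subst h
    rcases List.mem_cons.mp hcI with rfl | hmem
    · exact le_refl _
    · have := (List.pairwise_cons.mp hpw).1 cI hmem
      rw [cGT, decide_eq_true_eq] at this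
      omega

theorem minCand_head_le (A : List Int) {l r h0 : Nat}
    (h : (candL A cLT l r).head? = some h0) :
    ∀ i, l ≤ i → i ≤ r → A.getD h0 0 ≤ A.getD i 0 := by
  intro i hl hr
  obtain ⟨cI, hcI, hc⟩ := minCand_exists A (r - i) i (le_refl _) hl hr
  exact le_trans (head_le_of_mem_minCand A h hcI) hc

theorem maxCand_head_ge (A : List Int) {l r h0 : Nat}
    (h : (candL A cGT l r).head? = some h0) :
    ∀ i, l ≤ i → i ≤ r → A.getD i 0 ≤ A.getD h0 0 := by
  intro i hl hr
  obtain ⟨cI, hcI, hc⟩ := maxCand_exists A (r - i) i (le_refl _) hl hr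
  exact le_trans hc (head_ge_of_mem_maxCand A h hcI)

theorem candL_head_bounds (A : List Int) (c : Int → Int → Bool) {l r h0 : Nat}
    (h : (candL A c l r).head? = some h0) : l ≤ h0 ∧ h0 ≤ r := by
  have hm : h0 ∈ candL A c l r := by
    cases hc : candL A c l r with
    | nil => rw [hc] at h; simp at h
    | cons a t =>
      rw [hc] at h
      simp only [List.head?_cons, Option.some.injEq] at h
      rw [h]
      exact List.mem_cons_self
  rcases (mem_candL A c l r h0).mp hm with ⟨h1, h2, _⟩
  exact ⟨h2, h1⟩

theorem pvFront_rev (A : List Int) (m : List Nat) :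
    pvFront A m.reverse = (match m.head? with | some i => A.getD i 0 | none => 0) := by
  rw [pvFront, List.getLast?_reverse]

-- Wl facts
theorem sorted_WlList (K : Int) (A : List Int) (r : Nat) :
    ((List.range (r + 1)).filter (fun p => bddB K A p r)).Pairwise (· < ·) :=
  List.Pairwise.sublist (List.filter_sublist) List.pairwise_lt_range

theorem self_mem_WlList (K : Int) (A : List Int) (hK : 0 ≤ K) (r : Nat) :
    r ∈ (List.range (r + 1)).filter (fun p => bddB K A p r) := by
  rw [List.mem_filter]
  exact ⟨List.mem_range.mpr (by omega), (bddB_iff K A r r).mpr (bdd_self K A hK r)⟩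

theorem Wl_le (K : Int) (A : List Int) (hK : 0 ≤ K) (r : Nat) : Wl K A r ≤ r :=
  headD_le_of_sorted (sorted_WlList K A r) (self_mem_WlList K A hK r) _

theorem Wl_bdd (K : Int) (A : List Int) (hK : 0 ≤ K) (r : Nat) : bddP K A (Wl K A r) r := by
  have hne : (List.range (r + 1)).filter (fun p => bddB K A p r) ≠ [] :=
    List.ne_nil_of_mem (self_mem_WlList K A hK r)
  have := List.mem_filter.mp (headD_mem hne (r + 1))
  exact (bddB_iff K A _ r).mp this.2

theorem Wl_le_iff (K : Int) (A : List Int) (hK : 0 ≤ K) (r p : Nat) :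
    Wl K A r ≤ p ↔ bddP K A p r := by
  constructor
  · intro h
    by_cases hpr : p ≤ r
    · exact bdd_mono K A (Wl_bdd K A hK r) h (le_refl r)
    · exact bdd_of_gt K A (by omega)
  · intro hb
    by_cases hpr : p ≤ r
    · refine headD_le_of_sorted (sorted_WlList K A r) ?_ _
      rw [List.mem_filter]
      exact ⟨List.mem_range.mpr (by omega), (bddB_iff K A p r).mpr hb⟩
    · have := Wl_le K A hK r
      omega

theorem Wl_mono (K : Int) (A : List Int) (hK : 0 ≤ K) (e : Nat) :
    Wl K A e ≤ Wl K A (e + 1) := by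
  rw [Wl_le_iff K A hK]
  exact bdd_mono K A (Wl_bdd K A hK (e + 1)) (le_refl _) (by omega)

theorem shrink_spec (K : Int) (A : List Int) (hK : 0 ≤ K) (r : Nat) (hr : r < A.length) :
    ∀ fuel l, l ≤ r → r - l < fuel → l ≤ Wl K A r →
      pvShrink A K fuel l ((candL A cLT l r).reverse) ((candL A cGT l r).reverse)
        = (Wl K A r, (candL A cLT (Wl K A r) r).reverse, (candL A cGT (Wl K A r) r).reverse) := by
  intro fuel
  induction fuel with
  | zero => intro l hlr hfuel hlW; omega
  | succ fuel ih =>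
    intro l hlr hfuel hlW
    obtain ⟨hn0, hhn⟩ : ∃ h0, (candL A cLT l r).head? = some h0 := by
      cases hc : candL A cLT l r with
      | nil => exact absurd hc (candL_ne_nil A cLT hlr)
      | cons a t => exact ⟨a, rfl⟩
    obtain ⟨hx0, hhx⟩ : ∃ h0, (candL A cGT l r).head? = some h0 := by
      cases hc : candL A cGT l r with
      | nil => exact absurd hc (candL_ne_nil A cGT hlr)
      | cons a t => exact ⟨a, rfl⟩
    have hfn : pvFront A ((candL A cLT l r).reverse) = A.getD hn0 0 := by
      rw [pvFront_rev, hhn]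
    have hfx : pvFront A ((candL A cGT l r).reverse) = A.getD hx0 0 := by
      rw [pvFront_rev, hhx]
    have hnb := candL_head_bounds A cLT hhn
    have hxb := candL_head_bounds A cGT hhx
    rw [pvShrink, hfn, hfx]
    by_cases hcond : A.getD hx0 0 - A.getD hn0 0 > K
    · rw [if_pos hcond]
      have hnbdd : ¬ bddP K A l r := by
        intro hb
        have := hb hx0 (Finset.mem_Icc.mpr hxb) hn0 (Finset.mem_Icc.mpr hnb)
        omega
      have hlW1 : l + 1 ≤ Wl K A r := by
        have := (Wl_le_iff K A hK r l).mpr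
        by_contra h
        exact hnbdd ((Wl_le_iff K A hK r l).mp (by omega))
      have hlr1 : l + 1 ≤ r := by
        have := Wl_le K A hK r
        omega
      have hupd_mn :
          (if (candL A cLT l r).reverse.getLast? = some l then
              (candL A cLT l r).reverse.dropLast else (candL A cLT l r).reverse)
            = (candL A cLT (l + 1) r).reverse := by
        rw [List.getLast?_reverse, List.dropLast_reverse, candL_succ_left, apply_ite List.reverse]
      have hupd_mx :
          (if (candL A cGT l r).reverse.getLast? = some l then
              (candL A cGT l r).reverse.dropLast else (candL A cGT l r).reverse)
            = (candL A cGT (l + 1) r).reverse := by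
        rw [List.getLast?_reverse, List.dropLast_reverse, candL_succ_left, apply_ite List.reverse]
      rw [hupd_mn, hupd_mx]
      exact ih (l + 1) hlr1 (by omega) hlW1
    · rw [if_neg hcond]
      have hbdd : bddP K A l r := by
        intro i hi j hj
        rw [Finset.mem_Icc] at hi hj
        have h1 := maxCand_head_ge A hhx i hi.1 hi.2
        have h2 := minCand_head_le A hhn j hj.1 hj.2
        omega
      have : Wl K A r = l := le_antisymm ((Wl_le_iff K A hK r l).mpr hbdd) hlW
      rw [this]

theorem aLoop_inv (K : Int) (A : List Int) (hK : 0 ≤ K) :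
    ∀ n e, e + 1 + n = A.length → ∀ count : Int, 0 ≤ count → count ≤ 1000000000 →
      pvALoop A K (List.range' (e + 1) n) count (Wl K A e)
          ((candL A cLT (Wl K A e) e).reverse) ((candL A cGT (Wl K A e) e).reverse)
        = min (count + ∑ t ∈ Finset.Ico (e + 1) A.length,
            ((t : Int) - (Wl K A t : Int) + 1)) 1000000000 := by
  intro n
  induction n with
  | zero =>
    intro e hlen count h0 hcap
    rw [show List.range' (e + 1) 0 = [] from rfl, pvALoop,
      show A.length = e + 1 from by omega, Finset.Ico_self, Finset.sum_empty, add_zero,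
      min_eq_left hcap]
  | succ n ih =>
    intro e hlen count h0 hcap
    have hle1 : Wl K A e ≤ e + 1 := le_trans (Wl_le K A hK e) (by omega)
    have hlen1 : e + 1 < A.length := by omega
    rw [List.range'_succ, pvALoop, push_min A hle1, push_max A hle1,
      shrink_spec K A hK (e + 1) hlen1 A.length (Wl K A e) hle1 (by omega) (Wl_mono K A hK e)]
    dsimp only
    have hW1 : Wl K A (e + 1) ≤ e + 1 := Wl_le K A hK (e + 1)
    have hrest : (0:Int) ≤ ∑ t ∈ Finset.Ico (e + 1 + 1) A.length, ((t : Int) - (Wl K A t : Int) + 1) := by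
      refine Finset.sum_nonneg ?_
      intro t ht
      have := Wl_le K A hK t
      omega
    rw [Finset.sum_eq_sum_Ico_succ_bot hlen1]
    by_cases hbig : count + (((e + 1 : Nat) : Int) - ((Wl K A (e + 1) : Nat) : Int) + 1) > 1000000000
    · rw [if_pos hbig, min_eq_right (by omega)]
    · rw [if_neg hbig,
        ih (e + 1) (by omega) (count + (((e + 1 : Nat) : Int) - ((Wl K A (e + 1) : Nat) : Int) + 1))
          (by omega) (by omega)]
      omega

theorem solution_closed (K : Int) (A : List Int) (hK : 0 ≤ K) :
    solution K A
      = min (∑ t ∈ Finset.range A.length, ((t : Int) - (Wl K A t : Int) + 1)) 1000000000 := by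
  rcases hN : A.length with _ | m
  · rw [solution, hN]
    simp [pvALoop]
  · have hpos : 0 < A.length := by omega
    have hrange : List.range A.length = 0 :: List.range' 1 m := by
      rw [hN, List.range_eq_range', List.range'_succ]
    rw [solution, hrange, pvALoop,
      show (0 : Nat) :: pvPopGE A (A.getD 0 0) [] = (candL A cLT 0 0).reverse from rfl,
      show (0 : Nat) :: pvPopLE A (A.getD 0 0) [] = (candL A cGT 0 0).reverse from rfl,
      shrink_spec K A hK 0 hpos A.length 0 (le_refl 0) (by omega) (Nat.zero_le _)]
    dsimp only
    have hW0 : Wl K A 0 = 0 := Nat.le_antisymm (Wl_le K A hK 0) (Nat.zero_le _)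
    rw [hW0, if_neg (by norm_num)]
    have hinv := aLoop_inv K A hK m 0 (by omega)
      ((0 : Int) + (((0 : Nat) : Int) - ((0 : Nat) : Int) + 1)) (by norm_num) (by norm_num)
    rw [hW0] at hinv
    norm_num at hinv ⊢
    rw [hinv, Finset.range_eq_Ico, Finset.sum_eq_sum_Ico_succ_bot (show 0 < m + 1 by omega), hW0, hN]
    norm_num

theorem bInner_spec (K : Int) (A : List Int) (p : Nat) :
    ∀ n q0, q0 + n = A.length → p ≤ q0 → ∀ mx mn : Int, ∀ cnt : Int,
      (∀ i, p ≤ i → (i = p ∨ i < q0) → A.getD i 0 ≤ mx) →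
      (∃ i, p ≤ i ∧ (i = p ∨ i < q0) ∧ mx = A.getD i 0) →
      (∀ i, p ≤ i → (i = p ∨ i < q0) → mn ≤ A.getD i 0) →
      (∃ i, p ≤ i ∧ (i = p ∨ i < q0) ∧ mn = A.getD i 0) →
      pvBInner A K (List.range' q0 n) mx mn cnt
        = cnt + (((Finset.Ico q0 A.length).filter (fun q => bddB K A p q = true)).card : Int) := by
  intro n
  induction n with
  | zero =>
    intro q0 hlen hpq mx mn cnt _ _ _ _
    rw [show List.range' q0 0 = [] from rfl, pvBInner, show A.length = q0 from by omega,
      Finset.Ico_self, Finset.filter_empty, Finset.card_empty]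
    simp
  | succ n ih =>
    intro q0 hlen hpq mx mn cnt hub hubm hlb hlbm
    have hq0 : q0 < A.length := by omega
    rw [List.range'_succ, pvBInner]
    have hub' : ∀ i, p ≤ i → i ≤ q0 →
        A.getD i 0 ≤ (if A.getD q0 0 > mx then A.getD q0 0 else mx) := by
      intro i hpi hiq
      by_cases hiq0 : i = q0
      · subst hiq0
        split_ifs with h <;> omega
      · have := hub i hpi (Or.inr (by omega))
        split_ifs with h <;> omega
    have hubm' : ∃ i, p ≤ i ∧ i ≤ q0 ∧
        (if A.getD q0 0 > mx then A.getD q0 0 else mx) = A.getD i 0 := by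
      split_ifs with h
      · exact ⟨q0, hpq, le_refl _, rfl⟩
      · obtain ⟨i, h1, h2, h3⟩ := hubm
        exact ⟨i, h1, by omega, h3⟩
    have hlb' : ∀ i, p ≤ i → i ≤ q0 →
        (if A.getD q0 0 < mn then A.getD q0 0 else mn) ≤ A.getD i 0 := by
      intro i hpi hiq
      by_cases hiq0 : i = q0
      · subst hiq0
        split_ifs with h <;> omega
      · have := hlb i hpi (Or.inr (by omega))
        split_ifs with h <;> omega
    have hlbm' : ∃ i, p ≤ i ∧ i ≤ q0 ∧
        (if A.getD q0 0 < mn then A.getD q0 0 else mn) = A.getD i 0 := by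
      split_ifs with h
      · exact ⟨q0, hpq, le_refl _, rfl⟩
      · obtain ⟨i, h1, h2, h3⟩ := hlbm
        exact ⟨i, h1, by omega, h3⟩
    have hiff : ((if A.getD q0 0 > mx then A.getD q0 0 else mx)
        - (if A.getD q0 0 < mn then A.getD q0 0 else mn) > K) ↔ ¬ bddP K A p q0 := by
      constructor
      · intro hgt hb
        obtain ⟨i, hi1, hi2, hi3⟩ := hubm'
        obtain ⟨j, hj1, hj2, hj3⟩ := hlbm'
        have := hb i (Finset.mem_Icc.mpr ⟨hi1, hi2⟩) j (Finset.mem_Icc.mpr ⟨hj1, hj2⟩)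
        omega
      · intro hb
        by_contra hle
        apply hb
        intro i hi j hj
        rw [Finset.mem_Icc] at hi hj
        have h1 := hub' i hi.1 hi.2
        have h2 := hlb' j hj.1 hj.2
        omega
    by_cases hb : bddP K A p q0
    · rw [if_neg (fun hc => (hiff.mp hc) hb)]
      rw [ih (q0 + 1) (by omega) (by omega) _ _ (cnt + 1)
        (fun i hpi hc => hub' i hpi (by omega))
        (by obtain ⟨i, h1, h2, h3⟩ := hubm'; exact ⟨i, h1, Or.inr (by omega), h3⟩)
        (fun i hpi hc => hlb' i hpi (by omega))
        (by obtain ⟨i, h1, h2, h3⟩ := hlbm'; exact ⟨i, h1, Or.inr (by omega), h3⟩)]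
      rw [← Finset.insert_Ico_add_one_left_eq_Ico hq0, Finset.filter_insert,
        if_pos ((bddB_iff K A p q0).mpr hb), Finset.card_insert_of_notMem ?notmem]
      · push_cast
        ring
      case notmem =>
        intro hmem
        have := (Finset.mem_filter.mp hmem).1
        rw [Finset.mem_Ico] at this
        omega
    · rw [if_pos (hiff.mpr hb)]
      have hempty : (Finset.Ico q0 A.length).filter (fun q => bddB K A p q = true) = ∅ := by
        rw [Finset.filter_eq_empty_iff]
        intro q hq
        rw [bddB_iff]
        intro hbq
        exact hb (bdd_mono K A hbq (le_refl p) (Finset.mem_Ico.mp hq).1)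
      rw [hempty]
      simp

theorem bOuter_spec (K : Int) (A : List Int) :
    ∀ l : List Nat, (∀ p ∈ l, p < A.length) → ∀ cnt : Int,
      pvBOuter A K l cnt = cnt + (l.map (fun p => (cntB K A p : Int))).sum := by
  intro l
  induction l with
  | nil =>
    intro _ cnt
    rw [pvBOuter]
    simp
  | cons p t ih =>
    intro hmem cnt
    have hp : p < A.length := hmem p List.mem_cons_self
    rw [pvBOuter,
      bInner_spec K A p (A.length - p) p (by omega) (le_refl p) _ _ cnt
        (by intro i h1 h2; rcases h2 with rfl | h2 <;> omega)
        ⟨p, le_refl p, Or.inl rfl, rfl⟩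
        (by intro i h1 h2; rcases h2 with rfl | h2 <;> omega)
        ⟨p, le_refl p, Or.inl rfl, rfl⟩,
      ih (fun q hq => hmem q (List.mem_cons_of_mem p hq)), List.map_cons, List.sum_cons]
    simp only [cntB]
    ring

theorem alt_closed (K : Int) (A : List Int) :
    solution_alt K A = min (∑ p ∈ Finset.range A.length, (cntB K A p : Int)) 1000000000 := by
  rw [solution_alt, bOuter_spec K A (List.range A.length) (fun p hp => List.mem_range.mp hp) 0,
    zero_add]
  rfl

theorem sum_swap_eq (K : Int) (A : List Int) (hK : 0 ≤ K) :
    ∑ t ∈ Finset.range A.length, ((t : Int) - (Wl K A t : Int) + 1)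
      = ∑ p ∈ Finset.range A.length, (cntB K A p : Int) := by
  calc ∑ t ∈ Finset.range A.length, ((t : Int) - (Wl K A t : Int) + 1)
      = ∑ t ∈ Finset.range A.length, ∑ p ∈ Finset.range A.length,
          (if Wl K A t ≤ p ∧ p ≤ t then (1 : Int) else 0) := by
        refine Finset.sum_congr rfl ?_
        intro t ht
        rw [Finset.sum_boole]
        have hfe : (Finset.range A.length).filter (fun p => Wl K A t ≤ p ∧ p ≤ t)
            = Finset.Icc (Wl K A t) t := by
          ext p
          simp only [Finset.mem_filter, Finset.mem_range, Finset.mem_Icc]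
          have ht' := Finset.mem_range.mp ht
          constructor
          · rintro ⟨_, h2, h3⟩
            exact ⟨h2, h3⟩
          · rintro ⟨h2, h3⟩
            exact ⟨by omega, h2, h3⟩
        rw [hfe, Nat.card_Icc]
        have := Wl_le K A hK t
        push_cast
        omega
    _ = ∑ p ∈ Finset.range A.length, ∑ t ∈ Finset.range A.length,
          (if Wl K A t ≤ p ∧ p ≤ t then (1 : Int) else 0) := Finset.sum_comm
    _ = ∑ p ∈ Finset.range A.length, (cntB K A p : Int) := by
        refine Finset.sum_congr rfl ?_
        intro p hp
        rw [Finset.sum_boole]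
        have hfe : (Finset.range A.length).filter (fun t => Wl K A t ≤ p ∧ p ≤ t)
            = (Finset.Ico p A.length).filter (fun q => bddB K A p q = true) := by
          ext t
          simp only [Finset.mem_filter, Finset.mem_range, Finset.mem_Ico]
          constructor
          · rintro ⟨h1, h2, h3⟩
            exact ⟨⟨h3, h1⟩, (bddB_iff K A p t).mpr ((Wl_le_iff K A hK t p).mp h2)⟩
          · rintro ⟨⟨h3, h1⟩, hbq⟩
            exact ⟨h1, (Wl_le_iff K A hK t p).mpr ((bddB_iff K A p t).mp hbq), h3⟩
        rw [hfe, cntB]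

-- ===== VERDICT (by name: the statement is the Claim_ definition above) =====
theorem solution_spec : Claim_equal_solution := by
  intro K A _ hP
  unfold Spec_solution
  rcases hP with hK | hA
  · rw [solution_closed K A hK, alt_closed K A, sum_swap_eq K A hK]
  · subst hA
    rfl
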